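-- pv_equiv track=rewrite | github.com/wjin999/AISubtitleTranslator | src/srt_translator/glossary.py | find_matching_terms
-- ===== SOURCE A (Python) =====
-- from typing import Dict, List, Tuple
--
-- class Glossary:
--     """术语表管理类，支持精确匹配和模糊匹配。"""
--
--     def __init__(self):
--         # 保存原始大小写的术语
--         self._terms: Dict[str, str] = {}
--         # 小写索引用于匹配
--         self._lower_index: Dict[str, str] = {}
--
--     def add(self, term: str, translation: str) -> None:
--         """添加术语。"""
--         term = term.strip()
--         translation = translation.strip()
--         if term and translation:
--             self._terms[term] = translation
--             self._lower_index[term.lower()] = term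
--
--     def get(self, term: str) -> str | None:
--         """获取术语翻译（不区分大小写）。"""
--         original_term = self._lower_index.get(term.lower())
--         if original_term:
--             return self._terms.get(original_term)
--         return None
--
--     def find_matches(self, text: str) -> Dict[str, str]:
--         """
--         在文本中查找匹配的术语。
--
--         返回原始大小写的术语及其翻译。
--         """
--         text_lower = text.lower()
--         matches: Dict[str, str] = {}
--
--         for term, translation in self._terms.items():
--             if term.lower() in text_lower:
--                 matches[term] = translation
--
--         return matches
--
--     def __len__(self) -> int:
--         return len(self._terms)
--
--     def __bool__(self) -> bool:
--         return len(self._terms) > 0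
--
-- def find_matching_terms(glossary: Glossary | Dict[str, str], text: str) -> Dict[str, str]:
--     """
--     Find glossary terms that appear in the given text.
--
--     兼容旧的 Dict 接口和新的 Glossary 类。
--     """
--     if isinstance(glossary, Glossary):
--         return glossary.find_matches(text)
--
--     # 兼容旧的 Dict 接口
--     text_lower = text.lower()
--     return {
--         term: trans
--         for term, trans in glossary.items()
--         if term.lower() in text_lower
--     }
-- ===== SOURCE B (Python) =====
-- def find_matching_terms(glossary, text):
--     """Find glossary terms that appear (case-insensitively) in the text.
--
--     Alternative algorithm: for each distinct lowercased-term length L, build the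
--     hash set of all length-L windows of the lowercased text once, then decide
--     each term by a single set lookup instead of a substring search per term.
--     """
--     tl = text.lower()
--     n = len(tl)
--     keys = [term.lower() for term in glossary]
--     lengths = set(len(k) for k in keys)
--     wins = {L: {tl[i:i + L] for i in range(n - L + 1)} for L in lengths}
--     return {term: trans
--             for (term, trans), key in zip(glossary.items(), keys)
--             if key in wins[len(key)]}
-- ===== Notes on version B (the rewrite author's own statement) =====
-- stated objective: faster
-- what changed: B precomputes, for each distinct lowercased-term length L, the hash set of all length-L windows of the lowercased text, then decides every term by one set lookup instead of running a separate substring search over the text per term.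
import Mathlib
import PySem

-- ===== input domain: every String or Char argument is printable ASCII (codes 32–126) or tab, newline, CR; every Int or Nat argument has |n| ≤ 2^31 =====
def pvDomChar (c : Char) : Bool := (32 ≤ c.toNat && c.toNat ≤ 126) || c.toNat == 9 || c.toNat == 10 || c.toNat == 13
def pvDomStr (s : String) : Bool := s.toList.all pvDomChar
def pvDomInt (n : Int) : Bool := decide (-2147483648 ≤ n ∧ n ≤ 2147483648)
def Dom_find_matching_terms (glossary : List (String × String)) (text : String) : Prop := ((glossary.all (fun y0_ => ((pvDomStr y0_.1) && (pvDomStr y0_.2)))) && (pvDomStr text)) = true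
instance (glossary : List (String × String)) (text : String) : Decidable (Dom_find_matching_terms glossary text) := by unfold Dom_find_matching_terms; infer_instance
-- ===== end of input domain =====

-- B replaces the per-term substring scan by per-length window sets of the lowercased
-- text with one set lookup per term (measurably faster); return value proved equal.
-- ===== PORT A =====
def find_matching_terms (glossary : List (String × String)) (text : String) : List (String × String) :=
  let tl := PySem.Chars.lower text.toList
  ((PySem.Dict.ofList glossary).items.foldl
    (fun out p =>
      if PySem.Chars.isIn (PySem.Chars.lower p.1.toList) tl then out.insert p.1 p.2 else out)
    PySem.Dict.empty).items

-- ===== PORT B =====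
-- window set of all length-L slices of tl, as Python's {tl[i:i+L] for i in range(n-L+1)}
def pvWindows (tl : List Char) (L : Nat) : PySem.Set (List Char) :=
  PySem.Set.ofList ((PySem.List.pyRange 0 ((tl.length : Int) - L + 1)).map
    (fun i => PySem.List.slice tl (some i) (some (i + L))))

-- strings are ported on the List Char side per the PySem convention; wins[len(key)]
-- is ported with getD (the key is always present, so get and getD coincide)
def find_matching_terms_alt (glossary : List (String × String)) (text : String) : List (String × String) :=
  let tl := PySem.Chars.lower text.toList
  let items := (PySem.Dict.ofList glossary).items
  let keys := items.map (fun p => PySem.Chars.lower p.1.toList)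
  let lengths : PySem.Set Nat := PySem.Set.ofList (keys.map List.length)
  let wins : PySem.Dict Nat (PySem.Set (List Char)) :=
    lengths.foldl (fun d L => d.insert L (pvWindows tl L)) PySem.Dict.empty
  ((items.zip keys).foldl
    (fun out pk =>
      if PySem.Set.contains (wins.getD pk.2.length PySem.Set.empty) pk.2 then
        out.insert pk.1.1 pk.1.2
      else out)
    PySem.Dict.empty).items

-- ===== PRECONDITION & SPEC =====
def Spec_find_matching_terms (glossary : List (String × String)) (text : String) (out : List (String × String)) : Prop := out = find_matching_terms_alt glossary text
instance (glossary : List (String × String)) (text : String) (out : List (String × String)) : Decidable (Spec_find_matching_terms glossary text out) := by unfold Spec_find_matching_terms; infer_instance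

-- ===== CLAIM (what is proved, stated in full; the proofs are below) =====
def Claim_equal_find_matching_terms : Prop := ∀ (glossary : List (String × String)) (text : String), Dom_find_matching_terms glossary text → Spec_find_matching_terms glossary text (find_matching_terms glossary text)

-- ===== LEMMAS AND PROOFS =====


theorem pv_zip_map_foldl {α β γ : Type} (l : List α) (f : α → β) (g : γ → α × β → γ) (init : γ) :
    (l.zip (l.map f)).foldl g init = l.foldl (fun acc x => g acc (x, f x)) init := by
  induction l generalizing init with
  | nil => rfl
  | cons a t ih => simp [List.foldl, ih]

theorem pv_getD_wins (S : List Nat) (tl : List Char) (d : PySem.Dict Nat (PySem.Set (List Char)))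
    (L : Nat) (dflt : PySem.Set (List Char)) :
    (S.foldl (fun d L => d.insert L (pvWindows tl L)) d).getD L dflt =
      if L ∈ S then pvWindows tl L else d.getD L dflt := by
  induction S generalizing d with
  | nil => simp
  | cons a t ih =>
    simp only [List.foldl, ih, PySem.Dict.getD_insert, List.mem_cons]
    by_cases hL : L ∈ t <;> by_cases ha : L = a <;> simp [hL, ha]

theorem pv_contains_windows (tl k : List Char) :
    PySem.Set.contains (pvWindows tl k.length) k = PySem.Chars.isIn k tl := by
  rcases h : PySem.Chars.isIn k tl with _ | _
  · rw [Bool.eq_false_iff]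
    intro hc
    rw [PySem.Set.contains_iff] at hc
    rw [pvWindows, PySem.Set.mem_ofList, List.mem_map] at hc
    obtain ⟨i, hi, hslice⟩ := hc
    rw [PySem.List.mem_pyRange_one] at hi
    obtain ⟨hi0, _⟩ := hi
    have hiN : i = ((i.toNat : Nat) : Int) := by omega
    rw [hiN] at hslice
    have : PySem.List.slice tl (some (i.toNat : Int)) (some ((i.toNat : Int) + k.length))
        = List.take (i.toNat + k.length - i.toNat) (List.drop i.toNat tl) := by
      have := PySem.List.slice_natCast tl i.toNat (i.toNat + k.length)
      simpa using this
    rw [this] at hslice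
    have hpre : k <+: List.drop i.toNat tl := by
      rw [show i.toNat + k.length - i.toNat = k.length by omega] at hslice
      exact List.prefix_iff_eq_take.mpr hslice.symm
    have := (PySem.Chars.exists_prefix_drop_iff_isIn k tl).mp ⟨i.toNat, hpre⟩
    rw [h] at this; exact absurd this (by simp)
  · rw [PySem.Set.contains_iff]
    obtain ⟨j, hpre⟩ := (PySem.Chars.exists_prefix_drop_iff_isIn k tl).mpr h
    have hlen : k.length ≤ tl.length - j := by
      have := hpre.length_le
      simp at this; omega
    rw [pvWindows, PySem.Set.mem_ofList, List.mem_map]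
    by_cases hj : j ≤ tl.length - k.length ∧ k.length ≤ tl.length
    · refine ⟨(j : Int), ?_, ?_⟩
      · rw [PySem.List.mem_pyRange_one]; omega
      · have : PySem.List.slice tl (some (j : Int)) (some ((j : Int) + k.length))
            = List.take (j + k.length - j) (List.drop j tl) := by
          have := PySem.List.slice_natCast tl j (j + k.length)
          simpa using this
        rw [this, show j + k.length - j = k.length by omega]
        exact (List.prefix_iff_eq_take.mp hpre).symm
    · -- j past the end: then k = [] and index 0 witnesses the empty window
      have hk : k = [] := List.eq_nil_of_length_eq_zero (by omega)
      subst hk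
      refine ⟨(0 : Int), ?_, ?_⟩
      · rw [PySem.List.mem_pyRange_one]
        simp only [List.length_nil, Nat.cast_zero]
        omega
      · have h0 := PySem.List.slice_natCast tl 0 0
        simpa using h0

theorem find_matching_terms_spec : Claim_equal_find_matching_terms := by
  intro glossary text _
  unfold Spec_find_matching_terms find_matching_terms find_matching_terms_alt
  simp only []
  rw [pv_zip_map_foldl]
  rw [PySem.List.foldl_congr_mem ((PySem.Dict.ofList glossary).items)
    (fun (out : PySem.Dict String String) p =>
      if PySem.Chars.isIn (PySem.Chars.lower p.1.toList) (PySem.Chars.lower text.toList) then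
        out.insert p.1 p.2 else out)
    (fun (out : PySem.Dict String String) p =>
      if PySem.Set.contains
          (((PySem.Set.ofList
              (((PySem.Dict.ofList glossary).items.map (fun p => PySem.Chars.lower p.1.toList)).map
                List.length) : List Nat).foldl
            (fun d L => d.insert L (pvWindows (PySem.Chars.lower text.toList) L))
            PySem.Dict.empty).getD (PySem.Chars.lower p.1.toList).length PySem.Set.empty)
          (PySem.Chars.lower p.1.toList) then out.insert p.1 p.2 else out)
    PySem.Dict.empty ?_]
  · intro acc p hp
    have hmem : (PySem.Chars.lower p.1.toList).length ∈
        (((PySem.Dict.ofList glossary).items.map (fun p => PySem.Chars.lower p.1.toList)).map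
          List.length) :=
      List.mem_map_of_mem (List.mem_map_of_mem hp)
    simp only [pv_getD_wins, PySem.Set.mem_ofList]
    rw [if_pos hmem, pv_contains_windows]
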